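/- GENERATED by mk_final_copies.py from the proof of the farm's unit `decode_residue.11` (farm:decode_residue.11.2: Lemmas.lean) as the
   re-elaboration sweep compiled it — do not edit. -/
import Asan.CheckWalk
import Vorbis.Spec.Units.decode_residue_11

open X86 X86.User Asan Vorbis Vorbis.Spec Vorbis.Spec.DecodeResidue

set_option maxRecDepth 4000
set_option maxHeartbeats 4000000

namespace Vorbis.Spec.decode_residue_11

/-- **The ghost part of `arena_temp_restore`'s precondition at `done:`** (0x10fa5d, C line 2310), with `p = temp_alloc_point = L`:
the one outstanding temp block is released (`dead = [(T', sz)]`, `keep = []`), and the arena and the live list afterwards are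
the entry's again. (The example of Vorbis/Spec/DecodeResidueTest.lean, as a lemma.) -/
theorem ghosts {u₀ : State} {g : G} {v : State} (he : Entered u₀ g) (c : Common u₀ g v) :
    g.A'.temps = [(g.A'.T, g.sz)] ++ [] ∧ TempChain g.A'.T [(g.A'.T, g.sz)] g.tap ∧
      g.A'.withTemp g.tap [] = g.A ∧
      dropObjs ([(g.A'.T, g.sz)].map g.A'.tempObj) g.others' = g.others := by
  have hb : ADOBusy g.A' g.others' v.mem g.f g.sz := c.point.busy
  have hado := he.pre.ado
  refine ⟨?_, ?_, hado.roundtrip g.sz, ?_⟩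
  · rw [hb.one]
    rfl
  · have h4 := hb.ok.AR4
    rw [hb.one] at h4
    exact h4
  · have hv := he.pre.vorbis
    have hT1 : T1 g.e.mem g.f := hv.temp
    have hR : ResidueOK g.Blk g.e.mem g.f := hv.residue
    have hreq := T3_decode_residue hT1 hR he.pre.args.rn_lt he.pre.args.n_le
    have h8 : r8 g.sz ≤ stb_vorbis.temp_memory_required g.e.mem g.f := r8_le_of_le hreq hado.tmr8
    have hfit := (temp_alloc_ok hado h8).1
    exact dropObjs_cons_self (hado.ok.newTemp_not_mem g.sz hfit)

/-- **`*f` does not meet the range `arena_temp_restore` poisons** (the last clause of its precondition, contracts v2; 0x10fa5d,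
C line 2310): `*f` is a setup block of the arena (`DecodeInv.obj` at the function's entry), hence also a block of the busy arena
`A'` (same setup part), and a setup block ends at or below `B + S ≤ B + T'` (`arena_temp_restore.apart_of_block`). `p` is any cut
point. -/
theorem f_apart_released {u₀ : State} {g : G} {v : State} (he : Entered u₀ g) (c : Common u₀ g v) (p : Nat) :
    g.f + 1808 ≤ g.A'.B + g.A'.T ∨ g.A'.B + p ≤ g.f := by
  have hb : ADOBusy g.A' g.others' v.mem g.f g.sz := c.point.busy
  have hblk : g.A.Block g.f 1808 := he.pre.inv.obj
  have hblk' : g.A'.Block g.f 1808 := hblk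
  exact arena_temp_restore.apart_of_block hb.ok hblk' p

/-- **Where `*f` and the arena are, as numbers** for `u_omega`: `*f` lies in the data space and off the stack region; the busy
arena's `temp_offset` lies between `S` and `L`; the arena ends below the shadow; `L` is a small non-negative `int`. -/
theorem places {u₀ : State} {g : G} {v : State} (he : Entered u₀ g) (c : Common u₀ g v) :
    (0x100000 ≤ (g.e.reg .rdi).toNat ∧ (g.e.reg .rdi).toNat + 1808 ≤ 0xC00000 ∧
      ((g.e.reg .rdi).toNat + 1808 ≤ 0x700000 ∨ 0x800000 ≤ (g.e.reg .rdi).toNat)) ∧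
    (g.A.S ≤ g.A'.T ∧ g.A'.T ≤ g.A.L ∧ g.A.B + g.A.L ≤ 0xC00000 ∧ g.A.L < 2 ^ 31 ∧ 0x100000 ≤ g.A.B) := by
  have hob : g.Blk (objBlock g.f) := he.vorbis.obj
  have hobin := he.pre.env.ok.inside _ hob
  have hobst := he.pre.free.offStack _ hob
  simp only [vblock, voff] at hobin hobst
  have hb : ADOBusy g.A' g.others' v.mem g.f g.sz := c.point.busy
  have h2 := hb.ok.AR2
  have h1 := he.ado.ok.AR1
  have h1x := he.ado.ok.AR1x
  have e1 : g.A'.S = g.A.S := rfl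
  have e2 : g.A'.L = g.A.L := rfl
  have ef : (g.e.reg .rdi).toNat = g.f := rfl
  rw [e1, e2] at h2
  rw [ef]
  omega

/-- The 32-bit argument `esi = temp_alloc_point` of `arena_temp_restore` (`mov esi, r15d` at 0x10fa53), read unsigned as the
callee's contract reads it, is `tap = L`. -/
theorem tap_arg {g : G} (h : g.A.L < 2 ^ 31) :
    (Word.ofBV (Word.part Width.w32 (UInt64.ofNat g.tap))).toNat % 2 ^ 32 = g.tap := by
  show (Word.ofBV (Word.part Width.w32 (UInt64.ofNat g.A.L))).toNat % 2 ^ 32 = g.A.L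
  rw [Vorbis.toNat_ofBV32, Vorbis.toNat_part32, UInt64.toNat_ofNat']
  omega

/-- Four spans of the contract's footprint, by name: the 848 bytes of stack, the allocator's window of `*f`, the shadow of the
free part of the arena, the shadow of the own protected frame. -/
theorem foot_mem (g : G) :
    (⟨(g.e.reg .rsp).toNat - 848, (g.e.reg .rsp).toNat⟩ : Span) ∈ g.spec.footprint g.e ∧
    (⟨(g.e.reg .rdi).toNat + 132, (g.e.reg .rdi).toNat + 144⟩ : Span) ∈ g.spec.footprint g.e ∧
    shadowSpan (g.A.B + g.A.S) (g.A.B + g.A.L) ∈ g.spec.footprint g.e ∧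
    shadowSpan ((g.e.reg .rsp).toNat - 152) ((g.e.reg .rsp).toNat - 56) ∈ g.spec.footprint g.e := by
  unfold Spec.footprint
  simp only [vspec]
  unfold DecodeResidue.writes
  simp only [List.mem_cons, List.mem_append, true_or, or_true, and_self]

/-- **The segment's own footprint lies inside the contract's**: the stack below the return address, `temp_offset`, the shadow
of `[B + T', B + L)` (the released temp block and its red zone), the 12 shadow bytes of the own frame. `m` is the memory at the
segment's entry (`Common.same`), `m'` a later one. -/
theorem foot_through {u₀ : State} {g : G} {m m' : Mem} (hent : Entered u₀ g) {T' si : Nat}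
    (h : Mem.SameExcept (g.spec.footprint g.e) g.e.mem m)
    (hs : Mem.SameExcept [⟨(g.e.reg .rsp).toNat - 848, (g.e.reg .rsp).toNat⟩,
        ⟨(g.e.reg .rdi).toNat + 132, (g.e.reg .rdi).toNat + 136⟩,
        ⟨12582912 + (g.A.B + T') / 8, 12582912 + (g.A.B + g.A.L + 7) / 8⟩,
        ⟨12582912 + si, 12582912 + si + 12⟩] m m')
    (h1 : g.A.S ≤ T') (h2 : T' ≤ g.A.L) (hsi8 : si * 8 = (g.e.reg .rsp).toNat - 152) :
    Mem.SameExcept (g.spec.footprint g.e) g.e.mem m' := by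
  obtain ⟨m1, m2, m3, m4⟩ := foot_mem g
  have hroom := hent.room
  unfold G.RA at hroom
  refine h.step_same' hs ?_
  intro w hw
  simp only [List.mem_cons, List.not_mem_nil, or_false] at hw
  rcases hw with rfl | rfl | rfl | rfl
  · refine Or.inr ⟨_, m1, ?_, ?_⟩
    · simp only []
      omega
    · simp only []
      omega
  · refine Or.inr ⟨_, m2, ?_, ?_⟩
    · simp only []
      omega
    · simp only []
      omega
  · refine Or.inr ⟨_, m3, ?_, ?_⟩
    · simp only [shadowSpan]
      omega
    · simp only [shadowSpan]
      omega
  · refine Or.inr ⟨_, m4, ?_, ?_⟩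
    · simp only [shadowSpan]
      omega
    · simp only [shadowSpan]
      omega

/-- **The epilogue's two inline shadow stores** (0x10fa69 `mov QWORD PTR [rax+0xc00000],0`, 0x10fa74 `mov DWORD PTR
[rax+0xc00008],0`, `rax = si`) are the `storesMem` of the frame layout's `epilogue`: the memory `ShadowInv.epilogue_ra` speaks of. -/
theorem epilogue_mem (M : Mem) (si : Nat) :
    (M.writeLE (UInt64.ofNat si + 12582912) 8 0).writeLE (UInt64.ofNat si + 12582920) 4 0 =
      storesMem M si Vorbis.Frames.decode_residue.epilogue := by
  have e1 : shadowAddr (si + 0) = UInt64.ofNat si + 12582912 := by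
    unfold shadowAddr
    apply UInt64.toNat_inj.mp
    rw [UInt64.toNat_add, UInt64.toNat_ofNat', UInt64.toNat_ofNat']
    show _ = (si % 2 ^ 64 + 12582912) % 2 ^ 64
    omega
  have e2 : shadowAddr (si + 8) = UInt64.ofNat si + 12582920 := by
    unfold shadowAddr
    apply UInt64.toNat_inj.mp
    rw [UInt64.toNat_add, UInt64.toNat_ofNat', UInt64.toNat_ofNat']
    show _ = (si % 2 ^ 64 + 12582920) % 2 ^ 64
    omega
  unfold storesMem Vorbis.Frames.decode_residue
  simp only [List.foldl_cons, List.foldl_nil]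
  rw [e1, e2]

/-- **The function's postcondition and footprint at the state `w` after the `ret`** (0x10fa8c, C line 2311), from what the walk
of the segment knows: `M1` is the memory `arena_temp_restore` returned (its post `hpa`, `hps` already rewritten to the entry's
ghosts by `ghosts`; its footprint and the push of the return address in `hsame`, relative to the memory `v.mem` of the segment's
entry), `w.mem` is `M1` after the epilogue's two shadow stores. The caller's shadow layer is `ShadowInv.epilogue_ra`; `Bits`, μ
and `temp_memory_required` are read in windows of `*f` that the segment does not store to (`ObjSame`); ADO is the callee's
`ArenaOK` for the entry's ghost arena with the entry's `idle` / `full`; the decode-time invariant follows by `Entered.post`. -/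
theorem post_ok {u₀ : State} {g : G} {v w : State} (hent : Entered u₀ g) (c : Common u₀ g v) {M1 : Mem} {T' si : Nat}
    (hmem : w.mem = (M1.writeLE (UInt64.ofNat si + 12582912) 8 0).writeLE (UInt64.ofNat si + 12582920) 4 0)
    (hrsp : w.reg .rsp = g.e.reg .rsp + 8)
    (hfin : Mem.SameExcept [⟨(g.e.reg .rsp).toNat - 848, (g.e.reg .rsp).toNat⟩,
        ⟨(g.e.reg .rdi).toNat + 132, (g.e.reg .rdi).toNat + 136⟩,
        ⟨12582912 + (g.A.B + T') / 8, 12582912 + (g.A.B + g.A.L + 7) / 8⟩,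
        ⟨12582912 + si, 12582912 + si + 12⟩] v.mem w.mem)
    (hpa : ArenaOK g.A g.others M1 (g.e.reg .rdi).toNat)
    (hps : ShadowInv g.others g.frames' ((g.e.reg .rsp - 256).toNat + 8) M1)
    (hT' : g.A'.T = T') (hsi : (g.RA - 152) / 8 = si) :
    Mem.SameExcept (g.spec.footprint g.e) g.e.mem w.mem ∧ g.spec.post g.e w := by
  obtain ⟨⟨hf1, hf2, hf3⟩, hA1, hA2, hA3, hA4, hA5⟩ := places hent c
  rw [hT'] at hA1 hA2
  have hroom := hent.room
  have halign := hent.entry.align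
  unfold G.RA at hroom
  have hsi8 : si * 8 = (g.e.reg .rsp).toNat - 152 := by
    rw [← hsi]
    unfold G.RA
    omega
  have hsib : 0xE0000 ≤ si ∧ si < 0x100000 := by
    rw [← hsi]
    unfold G.RA
    omega
  -- the footprint
  have hfoot : Mem.SameExcept (g.spec.footprint g.e) g.e.mem w.mem := foot_through hent c.same hfin hA1 hA2 hsi8
  refine ⟨hfoot, ?_⟩
  -- `*f` but for `temp_offset` is as at the segment's entry
  have hos : ObjSame g.f v.mem w.mem := by
    apply ObjSame.of_sameExcept hfin
    · simp only [voff]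
      show (g.e.reg .rdi).toNat + 1808 ≤ 2 ^ 64
      omega
    · intro s hs
      show s.hi ≤ (g.e.reg .rdi).toNat ∨ (g.e.reg .rdi).toNat + 1808 ≤ s.lo ∨
        ((g.e.reg .rdi).toNat + 128 ≤ s.lo ∧ s.hi ≤ (g.e.reg .rdi).toNat + 136) ∨
        ((g.e.reg .rdi).toNat + 8 ≤ s.lo ∧ s.hi ≤ (g.e.reg .rdi).toNat + 12)
      simp only [List.mem_cons, List.not_mem_nil, or_false] at hs
      rcases hs with rfl | rfl | rfl | rfl <;> simp only [] <;> omega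
  -- the caller's shadow layer: the callee's post, then the epilogue's stores
  have hshadow : ShadowInv g.others g.frames (w.reg .rsp).toNat w.mem := by
    have e1 : (g.e.reg .rsp - 256).toNat + 8 = (g.e.reg .rsp).toNat - 248 := by
      have h256 : ((256 : Word)).toNat = 256 := rfl
      have hle : (256 : Word) ≤ g.e.reg .rsp := by
        rw [UInt64.le_iff_toNat_le]
        omega
      rw [UInt64.toNat_sub_of_le _ _ hle, h256]
      omega
    have e2 : (w.reg .rsp).toNat = (g.e.reg .rsp).toNat + 8 := by
      rw [hrsp]
      exact toNat_add_ofNat (g.e.reg .rsp) 8 (by omega)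
    rw [e1] at hps
    have hps' : ShadowInv g.others
        (((g.e.reg .rsp).toNat - Vorbis.Frames.decode_residue.raOff, Vorbis.Frames.decode_residue) :: g.frames)
        ((g.e.reg .rsp).toNat - 248) M1 := hps
    have hfr : ∀ bF, bF ∈ g.frames → (g.e.reg .rsp).toNat + 8 ≤ bF.1 := by
      intro bF hbF
      exact (hent.pre.shadow.inv.stack.active bF hbF).2.2.1
    have hep := hps'.epilogue_ra halign (by omega) hfr
    have e3 : ((g.e.reg .rsp).toNat - Vorbis.Frames.decode_residue.raOff) / 8 = si := hsi
    rw [e3, ← epilogue_mem M1 si, ← hmem, ← e2] at hep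
    exact hep
  -- `Bits`, ADO, μ
  have hbits : Bits g.Blk g.len w.mem g.f := c.point.vorbis.bits.frame hos
  have hb : ADOBusy g.A' g.others' v.mem g.f g.sz := c.point.busy
  have etmr : stb_vorbis.temp_memory_required w.mem g.f = stb_vorbis.temp_memory_required v.mem g.f := by
    simp only [vacc, voff]
    exact hos.u32 12 (by decide)
  have hsf : (Vorbis.Block.mk g.f Off.sizeof.stb_vorbis).Same M1 w.mem := by
    simp only [vblock, voff]
    show Mem.EqOn (g.e.reg .rdi).toNat ((g.e.reg .rdi).toNat + 1808) M1 w.mem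
    rw [hmem]
    u_eqon
  have hado : ADO g.A g.others w.mem g.f := by
    refine ⟨hpa.frame_obj ?_ hsf, hent.ado.idle, hent.ado.full, ?_, ?_⟩
    · simp only [voff]
      show (g.e.reg .rdi).toNat + 1808 ≤ 2 ^ 64
      omega
    · rw [etmr]
      exact hb.tmr8
    · rw [etmr]
      exact hb.room
  have hmu : mu w.mem g.f ≤ mu g.e.mem g.f := by
    rw [mu_transfer (hos.sub (by decide))]
    exact c.mu_le
  exact hent.post hfoot hshadow hbits hado hmu

/-- **COMMON at a state that differs from `v` in registers other than rbp / rsp only** (a trampoline's `mov r15d, [slot]` and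
`jmp`): same memory, same frame registers, the ABI invariant. -/
theorem common_move {u₀ : State} {g : G} {v s : State} (c : Common u₀ g v) (hm : s.mem = v.mem)
    (hbp : s.reg .rbp = v.reg .rbp) (hsp : s.reg .rsp = v.reg .rsp) (hinv : abiInv s) : Common u₀ g s where
  rbp := hbp.trans c.rbp
  rsp := hsp.trans c.rsp
  code := by
    rw [hm]
    exact c.code
  inv := hinv
  s_rbp := by
    rw [hm]
    exact c.s_rbp
  s_r15 := by
    rw [hm]
    exact c.s_r15
  s_r14 := by
    rw [hm]
    exact c.s_r14
  s_r13 := by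
    rw [hm]
    exact c.s_r13
  s_r12 := by
    rw [hm]
    exact c.s_r12
  s_rbx := by
    rw [hm]
    exact c.s_rbx
  fr_f := by
    rw [hm]
    exact c.fr_f
  fr_rb := by
    rw [hm]
    exact c.fr_rb
  fr_ch := by
    rw [hm]
    exact c.fr_ch
  fr_prd := by
    rw [hm]
    exact c.fr_prd
  fr_w := by
    rw [hm]
    exact c.fr_w
  fr_rtype := by
    rw [hm]
    exact c.fr_rtype
  fr_pcd := by
    rw [hm]
    exact c.fr_pcd
  fr_si := by
    rw [hm]
    exact c.fr_si
  same := by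
    rw [hm]
    exact c.same
  shadow := by
    rw [hm]
    exact c.shadow
  point := by
    rw [hm]
    exact c.point
  sep := by
    rw [hm]
    exact c.sep
  tb := by
    rw [hm]
    exact c.tb
  obj := by
    rw [hm]
    exact c.obj
  reads := by
    rw [hm]
    exact c.reads
  dnd_same := by
    rw [hm]
    exact c.dnd_same
  rb_same := by
    rw [hm]
    exact c.rb_same
  mu_le := by
    rw [hm]
    exact c.mu_le

/-- **From a trampoline to `done:`**: after `mov r15d, [slot] ; jmp 10fa53` (the slot holds `temp_alloc_point = tap`) the state
satisfies the assertion `At32` of `done:`. The walker's facts about the state `s` at 0x10fa53 are the hypotheses. -/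
theorem at32_of_tramp {u₀ : State} {g : G} {v s : State} (hent : Entered u₀ g) (c : Common u₀ g v)
    (hrip : s.rip = L.decode_residue.cut32) (hm : s.mem = v.mem) (hk : RegsKept [Reg.r15] v s)
    (hr15 : s.reg .r15 = Word.ofBV (BitVec.ofNat 32 g.tap)) (hfl : s.flags = v.flags) (hmxcsr : s.mxcsr = v.mxcsr) :
    At32 u₀ g s := by
  have hL : g.A.L < 2 ^ 31 := (places hent c).2.2.2.2.1
  have hinv : abiInv s := by
    have hi : abiInv v := c.inv
    refine Vorbis.abiInv_of ?_ ?_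
    · rw [hfl]
      exact hi.1
    · rw [hmxcsr]
      exact hi.2
  refine ⟨hrip, common_move c hm (hk .rbp rfl) (hk .rsp rfl) hinv, ?_⟩
  rw [hr15]
  show Word.ofBV (BitVec.ofNat 32 g.A.L) = UInt64.ofNat g.A.L
  apply UInt64.toNat_inj.mp
  rw [Vorbis.toNat_ofBV32, BitVec.toNat_ofNat, UInt64.toNat_ofNat']
  omega

end Vorbis.Spec.decode_residue_11
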